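-- pv_equiv track=rewrite | github.com/nathan-85/flyingphase | scripts/flyingphase.py | _is_weather_token
-- ===== SOURCE A (Python) =====
-- def _is_weather_token(token: str) -> bool:
--     """Check if a token is a valid weather phenomenon group.
--
--     Weather tokens are composed of 2-character codes (with optional +/- prefix).
--     e.g. TSRA = TS+RA, BLDU = BL+DU, +SHRA = SH+RA, -DZ = DZ
--     """
--     t = token.upper().lstrip('+-')
--     if len(t) < 2 or len(t) > 8 or len(t) % 2 != 0:
--         return False
--     wx_codes = {
--         'MI', 'BC', 'PR', 'DR', 'BL', 'SH', 'TS', 'FZ',  # Descriptors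
--         'DZ', 'RA', 'SN', 'SG', 'IC', 'PL', 'GR', 'GS',  # Precipitation
--         'BR', 'FG', 'FU', 'VA', 'DU', 'SA', 'HZ', 'PO',  # Obscuration
--         'SQ', 'FC', 'SS', 'DS',                             # Other
--     }
--     return all(t[i:i+2] in wx_codes for i in range(0, len(t), 2))
-- ===== SOURCE B (Python) =====
-- WX_CODES = {
--     'MI', 'BC', 'PR', 'DR', 'BL', 'SH', 'TS', 'FZ',
--     'DZ', 'RA', 'SN', 'SG', 'IC', 'PL', 'GR', 'GS',
--     'BR', 'FG', 'FU', 'VA', 'DU', 'SA', 'HZ', 'PO',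
--     'SQ', 'FC', 'SS', 'DS',
-- }
--
--
-- def _is_weather_token(token: str) -> bool:
--     """Recursively consume one 2-char code at a time, counting groups.
--
--     The explicit length/evenness guard disappears: an odd tail or an empty
--     string fail the code lookup / group-count test by themselves.
--     """
--     def groups(s: str, n: int) -> bool:
--         if not s:
--             return 1 <= n <= 4
--         if s[:2] in WX_CODES:
--             return groups(s[2:], n + 1)
--         return False
--
--     return groups(token.upper().lstrip('+-'), 0)
-- ===== Notes on version B (the rewrite author's own statement) =====
-- stated objective: alternative
-- what changed: Replaces the explicit length/evenness guard plus indexed range(0,len,2) chunk loop with a grammar-style recursion that consumes one 2-char code at a time while counting groups (1..4), so no length check or index arithmetic remains.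
import Mathlib
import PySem

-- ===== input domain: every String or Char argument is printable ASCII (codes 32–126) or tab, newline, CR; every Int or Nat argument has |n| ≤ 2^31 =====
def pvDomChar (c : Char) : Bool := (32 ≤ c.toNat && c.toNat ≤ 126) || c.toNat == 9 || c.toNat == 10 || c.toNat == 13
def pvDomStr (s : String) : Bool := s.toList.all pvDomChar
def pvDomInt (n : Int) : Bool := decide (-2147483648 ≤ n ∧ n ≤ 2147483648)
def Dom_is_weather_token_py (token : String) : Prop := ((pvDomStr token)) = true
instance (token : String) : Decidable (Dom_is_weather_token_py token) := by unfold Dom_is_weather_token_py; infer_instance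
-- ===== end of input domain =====

-- B replaces A's length guard + indexed chunk loop by a grammar-style recursion
-- consuming one 2-char code at a time while counting groups (alternative, not faster).

-- ===== PORT A =====
-- the wx_codes set literal (insertion order of the Python literal)
def wxCodes : List (List Char) :=
  [['M','I'], ['B','C'], ['P','R'], ['D','R'], ['B','L'], ['S','H'], ['T','S'], ['F','Z'],
   ['D','Z'], ['R','A'], ['S','N'], ['S','G'], ['I','C'], ['P','L'], ['G','R'], ['G','S'],
   ['B','R'], ['F','G'], ['F','U'], ['V','A'], ['D','U'], ['S','A'], ['H','Z'], ['P','O'],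
   ['S','Q'], ['F','C'], ['S','S'], ['D','S']]

def is_weather_token_py (token : String) : Bool :=
  -- t = token.upper().lstrip('+-'); lstrip('+-') drops exactly the leading '+'/'-' chars (exact)
  let t : List Char := ((PySem.Str.upper token).toList).dropWhile (fun c => c == '+' || c == '-')
  if t.length < 2 || t.length > 8 || t.length % 2 != 0 then false
  else
    -- all(t[i:i+2] in wx_codes for i in range(0, len(t), 2))
    (PySem.List.pyRange 0 (t.length : Int) 2).all
      (fun i => wxCodes.contains (PySem.List.slice t (some i) (some (i + 2))))

-- ===== PORT B =====
def wxPairs : List (Char × Char) :=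
  [('M','I'), ('B','C'), ('P','R'), ('D','R'), ('B','L'), ('S','H'), ('T','S'), ('F','Z'),
   ('D','Z'), ('R','A'), ('S','N'), ('S','G'), ('I','C'), ('P','L'), ('G','R'), ('G','S'),
   ('B','R'), ('F','G'), ('F','U'), ('V','A'), ('D','U'), ('S','A'), ('H','Z'), ('P','O'),
   ('S','Q'), ('F','C'), ('S','S'), ('D','S')]

-- groups(s, n): consume one 2-char code per step; 's[:2] in WX_CODES' on a
-- single leftover char never matches (the [_] case)
def wxGroups : List Char → Nat → Bool
  | [], n => decide (1 ≤ n ∧ n ≤ 4)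
  | [_], _ => false
  | a :: b :: rest, n => if wxPairs.contains (a, b) then wxGroups rest (n + 1) else false

def is_weather_token_py_alt (token : String) : Bool :=
  wxGroups (((PySem.Str.upper token).toList).dropWhile (fun c => c == '+' || c == '-')) 0

-- ===== PRECONDITION & SPEC =====
def Spec_is_weather_token_py (token : String) (out : Bool) : Prop := out = is_weather_token_py_alt token
instance (token : String) (out : Bool) : Decidable (Spec_is_weather_token_py token out) := by unfold Spec_is_weather_token_py; infer_instance

-- ===== CLAIM (what is proved, stated in full; the proofs are below) =====
def Claim_equal_is_weather_token_py : Prop := ∀ (token : String), Dom_is_weather_token_py token → Spec_is_weather_token_py token (is_weather_token_py token)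

-- ===== LEMMAS AND PROOFS =====

-- membership in the two code containers coincides
theorem mem_wx (a b : Char) : ([a, b] ∈ wxCodes) ↔ ((a, b) ∈ wxPairs) := by
  simp [wxCodes, wxPairs, Prod.ext_iff]

-- a true run of wxGroups consumed at most 8 - 2n further chars
theorem wxGroups_len_le : ∀ (t : List Char) (n : Nat), wxGroups t n = true → t.length + 2 * n ≤ 8 := by
  intro t n
  induction t, n using wxGroups.induct with
  | case1 n => intro h; simp [wxGroups] at h; simp; omega
  | case2 c n => intro h; simp [wxGroups] at h
  | case3 a b rest n hm ih =>
      intro h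
      simp only [wxGroups, if_pos hm] at h
      have := ih h; simp only [List.length_cons]; omega
  | case4 a b rest n hm =>
      intro h
      simp [wxGroups] at h
      simp [List.contains_eq_mem] at hm
      exact absurd h.1 hm

-- the core equality for the stripped string
theorem body_eq (t : List Char) :
    (if t.length < 2 || t.length > 8 || t.length % 2 != 0 then false
     else (PySem.List.pyRange 0 (t.length : Int) 2).all
       (fun i => wxCodes.contains (PySem.List.slice t (some i) (some (i + 2)))))
    = wxGroups t 0 := by
  match t with
  | [] => simp [wxGroups]
  | [a] => simp [wxGroups]
  | [a, b] =>
      simp only [List.length_cons, List.length_nil]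
      norm_num
      rw [show PySem.List.pyRange 0 2 2 = [0] from by decide]
      simp [PySem.List.slice_toNat, wxGroups, List.contains_eq_mem, mem_wx]
  | [a, b, c] => simp [wxGroups]
  | [a, b, c, d] =>
      simp only [List.length_cons, List.length_nil]
      norm_num
      rw [show PySem.List.pyRange 0 4 2 = [0, 2] from by decide]
      simp [PySem.List.slice_toNat, wxGroups, List.contains_eq_mem, mem_wx]
  | [a, b, c, d, e] => simp [wxGroups]
  | [a, b, c, d, e, f] =>
      simp only [List.length_cons, List.length_nil]
      norm_num
      rw [show PySem.List.pyRange 0 6 2 = [0, 2, 4] from by decide]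
      simp [PySem.List.slice_toNat, wxGroups, List.contains_eq_mem, mem_wx]
  | [a, b, c, d, e, f, g] => simp [wxGroups]
  | [a, b, c, d, e, f, g, h] =>
      simp only [List.length_cons, List.length_nil]
      norm_num
      rw [show PySem.List.pyRange 0 8 2 = [0, 2, 4, 6] from by decide]
      simp [PySem.List.slice_toNat, wxGroups, List.contains_eq_mem, mem_wx]
  | a :: b :: c :: d :: e :: f :: g :: h :: i :: rest =>
      have hg : ((a :: b :: c :: d :: e :: f :: g :: h :: i :: rest).length < 2
          || (a :: b :: c :: d :: e :: f :: g :: h :: i :: rest).length > 8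
          || (a :: b :: c :: d :: e :: f :: g :: h :: i :: rest).length % 2 != 0) = true := by
        simp
      have hfalse : wxGroups (a :: b :: c :: d :: e :: f :: g :: h :: i :: rest) 0 = false := by
        cases hw : wxGroups (a :: b :: c :: d :: e :: f :: g :: h :: i :: rest) 0
        · rfl
        · exfalso
          have hl := wxGroups_len_le _ 0 hw
          simp at hl
          omega
      rw [hg, hfalse, if_pos rfl]

-- ===== VERDICT (by name: the statement is the Claim_ definition above) =====
theorem is_weather_token_py_spec : Claim_equal_is_weather_token_py := by
  intro token _
  unfold Spec_is_weather_token_py is_weather_token_py is_weather_token_py_alt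
  exact body_eq _
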